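-- pv_equiv track=rewrite | github.com/BeyondDrewTV/stylescope | backend/hardcover_client.py | _extract_isbns
-- ===== SOURCE A (Python) =====
-- from typing import Optional, Dict, Any, List
--
-- def _extract_isbns(book: dict) -> Dict[str, Optional[str]]:
--     """Extract ISBN-10 and ISBN-13 from editions."""
--     isbn10 = None
--     isbn13 = None
--     editions = book.get("editions") or []
--     for ed in editions:
--         if ed.get("isbn_13") and not isbn13:
--             isbn13 = ed["isbn_13"]
--         if ed.get("isbn_10") and not isbn10:
--             isbn10 = ed["isbn_10"]
--         if isbn10 and isbn13:
--             break
--     return {"isbn10": isbn10, "isbn13": isbn13}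
-- ===== SOURCE B (Python) =====
-- def _extract_isbns(book: dict):
--     """Extract ISBN-10 and ISBN-13 from editions."""
--     editions = book.get("editions") or []
--     isbn13 = next((ed["isbn_13"] for ed in editions if ed.get("isbn_13")), None)
--     isbn10 = next((ed["isbn_10"] for ed in editions if ed.get("isbn_10")), None)
--     return {"isbn10": isbn10, "isbn13": isbn13}
-- ===== Notes on version B (the rewrite author's own statement) =====
-- stated objective: idiomatic
-- what changed: Replaces the single interleaved early-exit loop maintaining two mutable slots with two independent first-match scans (next over a filtering generator) computed per key.
import Mathlib
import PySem

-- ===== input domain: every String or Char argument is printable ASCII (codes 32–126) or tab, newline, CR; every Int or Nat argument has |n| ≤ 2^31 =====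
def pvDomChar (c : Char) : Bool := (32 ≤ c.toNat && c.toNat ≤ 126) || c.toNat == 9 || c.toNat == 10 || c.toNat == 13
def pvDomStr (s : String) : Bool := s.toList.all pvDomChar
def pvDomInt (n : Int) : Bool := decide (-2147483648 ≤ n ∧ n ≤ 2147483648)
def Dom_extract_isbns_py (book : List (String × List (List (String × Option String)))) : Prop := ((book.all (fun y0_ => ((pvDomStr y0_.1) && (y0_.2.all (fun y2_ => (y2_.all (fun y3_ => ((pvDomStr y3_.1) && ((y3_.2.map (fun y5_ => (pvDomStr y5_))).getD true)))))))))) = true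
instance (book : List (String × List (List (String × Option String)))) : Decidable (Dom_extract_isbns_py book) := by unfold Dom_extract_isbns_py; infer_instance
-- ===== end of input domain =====

-- One honest line: B computes the two first matches with two independent short-circuit
-- scans instead of A's single two-slot early-exit loop; same return value (idiomatic).

-- ===== PORT A =====
-- Python truthiness of an Optional[str] value (None and "" are falsy).
def pvTruthy (o : Option String) : Bool :=
  match o with
  | some s => s ≠ ""
  | none => false

-- ed.get(key): missing key → None (falsy); present value is itself an Option String.
def pvEdGet (ed : List (String × Option String)) (key : String) : Option String :=
  (PySem.Dict.get? (PySem.Dict.mk ed) key).getD none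

-- one slot-update statement: 'if ed.get(key) and not slot: slot = ed[key]'
def pvUpd (key : String) (i : Option String) (ed : List (String × Option String)) : Option String :=
  if pvTruthy (pvEdGet ed key) && !pvTruthy i then pvEdGet ed key else i

-- A's for-loop, carrying the two slots, with the early break.
def pvExtLoop : List (List (String × Option String)) → Option String → Option String →
    (Option String × Option String)
  | [], isbn10, isbn13 => (isbn10, isbn13)
  | ed :: rest, isbn10, isbn13 =>
    let isbn13' := pvUpd "isbn_13" isbn13 ed
    let isbn10' := pvUpd "isbn_10" isbn10 ed
    if pvTruthy isbn10' && pvTruthy isbn13' then (isbn10', isbn13')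
    else pvExtLoop rest isbn10' isbn13'

def extract_isbns_py (book : List (String × List (List (String × Option String)))) : List (String × Option String) :=
  -- editions = book.get("editions") or []
  let editions := (PySem.Dict.get? (PySem.Dict.mk book) "editions").getD []
  let r := pvExtLoop editions none none
  [("isbn10", r.1), ("isbn13", r.2)]

-- ===== PORT B =====
-- next((ed[key] for ed in editions if ed.get(key)), None): first-match scan for one key.
def pvFirstIsbn (key : String) (editions : List (List (String × Option String))) : Option String :=
  match editions.find? (fun ed => pvTruthy (pvEdGet ed key)) with
  | some ed => pvEdGet ed key
  | none => none

def extract_isbns_py_alt (book : List (String × List (List (String × Option String)))) : List (String × Option String) :=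
  let editions := (PySem.Dict.get? (PySem.Dict.mk book) "editions").getD []
  let isbn13 := pvFirstIsbn "isbn_13" editions
  let isbn10 := pvFirstIsbn "isbn_10" editions
  [("isbn10", isbn10), ("isbn13", isbn13)]

-- ===== PRECONDITION & SPEC =====
def Spec_extract_isbns_py (book : List (String × List (List (String × Option String)))) (out : List (String × Option String)) : Prop := out = extract_isbns_py_alt book
instance (book : List (String × List (List (String × Option String)))) (out : List (String × Option String)) : Decidable (Spec_extract_isbns_py book out) := by unfold Spec_extract_isbns_py; infer_instance

-- ===== CLAIM (what is proved, stated in full; the proofs are below) =====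
def Claim_equal_extract_isbns_py : Prop := ∀ (book : List (String × List (List (String × Option String)))), Dom_extract_isbns_py book → Spec_extract_isbns_py book (extract_isbns_py book)

-- ===== LEMMAS AND PROOFS =====

-- A slot i pushed through editions eds: keep i if truthy, else the first match, else i.
def pvSlot (key : String) (i : Option String) (eds : List (List (String × Option String))) : Option String :=
  if pvTruthy i then i
  else match eds.find? (fun ed => pvTruthy (pvEdGet ed key)) with
       | some ed => pvEdGet ed key
       | none => i

theorem pvSlot_of_truthy (key : String) {i : Option String}
    (h : pvTruthy i = true) (eds : List (List (String × Option String))) :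
    pvSlot key i eds = i := by simp [pvSlot, h]

theorem pvSlot_none (key : String) (eds : List (List (String × Option String))) :
    pvSlot key none eds = pvFirstIsbn key eds := by
  simp only [pvSlot, pvFirstIsbn, pvTruthy, if_neg Bool.false_ne_true]

theorem pvSlot_step (key : String) (i : Option String) (ed : List (String × Option String))
    (rest : List (List (String × Option String))) :
    pvSlot key i (ed :: rest) = pvSlot key (pvUpd key i ed) rest := by
  unfold pvUpd
  by_cases hi : pvTruthy i
  · simp [hi, pvSlot_of_truthy key hi]
  · by_cases g : pvTruthy (pvEdGet ed key)
    · simp [pvSlot, hi, g, List.find?]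
    · simp [pvSlot, hi, g, List.find?]

theorem pvExtLoop_eq (eds : List (List (String × Option String)))
    (i10 i13 : Option String) :
    pvExtLoop eds i10 i13 = (pvSlot "isbn_10" i10 eds, pvSlot "isbn_13" i13 eds) := by
  induction eds generalizing i10 i13 with
  | nil => simp [pvExtLoop, pvSlot]
  | cons ed rest ih =>
    rw [pvSlot_step, pvSlot_step]
    simp only [pvExtLoop]
    split
    next h =>
      obtain ⟨h10, h13⟩ := (Bool.and_eq_true _ _).mp h
      rw [pvSlot_of_truthy _ h10, pvSlot_of_truthy _ h13]
    next _ => exact ih _ _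

-- ===== VERDICT (by name: the statement is the Claim_ definition above) =====
theorem extract_isbns_py_spec : Claim_equal_extract_isbns_py := by
  intro book _
  unfold Spec_extract_isbns_py extract_isbns_py extract_isbns_py_alt
  simp only [pvExtLoop_eq, pvSlot_none]
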